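-- pv_equiv track=rewrite | github.com/kirasir1/unicodechar | keyncipher.py | genkeyshift
-- ===== SOURCE A (Python) =====
-- def genkeyshift(keylist):
--     keyvalue = 0
--     keystr=[*keylist]
--     for i in range(len(keystr)):
--         keystr[i]=ord(keystr[i])
--         match i % 2:
--             case 0:
--                 keyvalue += keystr[i]
--             case 1:
--                 keyvalue -= keystr[i]
--     return abs(keyvalue)
-- ===== SOURCE B (Python) =====
-- def genkeyshift(keylist):
--     ks = [*keylist]
--     even = sum(ord(c) for c in ks[0::2])
--     odd = sum(ord(c) for c in ks[1::2])
--     return abs(even - odd)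
-- ===== Notes on version B (the rewrite author's own statement) =====
-- stated objective: simpler
-- what changed: Replaced the indexed loop with an in-place mutation and a per-index parity branch by two sums over the even- and odd-index slices, returning abs of their difference.
import Mathlib
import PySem

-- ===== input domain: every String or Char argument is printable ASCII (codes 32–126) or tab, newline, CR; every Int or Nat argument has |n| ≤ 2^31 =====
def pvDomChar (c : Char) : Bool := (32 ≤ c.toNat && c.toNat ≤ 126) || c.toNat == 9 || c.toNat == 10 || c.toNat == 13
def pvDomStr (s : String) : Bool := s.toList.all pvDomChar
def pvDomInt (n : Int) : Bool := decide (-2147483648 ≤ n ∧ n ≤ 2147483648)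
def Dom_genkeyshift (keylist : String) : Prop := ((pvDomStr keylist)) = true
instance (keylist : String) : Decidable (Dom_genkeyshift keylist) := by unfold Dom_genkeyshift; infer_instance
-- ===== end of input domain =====

-- B replaces A's indexed loop with a parity branch by two sums over the even/odd index slices (simpler decomposition; return value only).

-- ===== PORT A =====
-- for i in range(len(keystr)): the in-place overwrite keystr[i]=ord(keystr[i]) is immediately
-- read back at the same index, so the value used is ord of the original char; indices from
-- range(len) are always in range, so getD never takes its default.
def genkeyshift (keylist : String) : Int :=
  let keystr := keylist.toList
  let keyvalue : Int :=
    (List.range keystr.length).foldl (fun kv i =>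
      let o : Int := ((keystr.getD i ' ').toNat : Int)
      match i % 2 with
      | 0 => kv + o
      | _ => kv - o) 0
  |keyvalue|

-- ===== PORT B =====
-- ks[0::2] (step-2 slice, ported by hand, exact: elements at even positions)
def pvEveryOther : List Char → List Char
  | [] => []
  | [c] => [c]
  | c :: _ :: rest => c :: pvEveryOther rest

def genkeyshift_alt (keylist : String) : Int :=
  let ks := keylist.toList
  let even : Int := ((pvEveryOther ks).map (fun c => (c.toNat : Int))).sum
  let odd : Int := ((pvEveryOther ks.tail).map (fun c => (c.toNat : Int))).sum  -- ks[1::2]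
  |even - odd|

-- ===== PRECONDITION & SPEC =====
def Spec_genkeyshift (keylist : String) (out : Int) : Prop := out = genkeyshift_alt keylist
instance (keylist : String) (out : Int) : Decidable (Spec_genkeyshift keylist out) := by unfold Spec_genkeyshift; infer_instance

-- ===== CLAIM (what is proved, stated in full; the proofs are below) =====
def Claim_equal_genkeyshift : Prop := ∀ (keylist : String), Dom_genkeyshift keylist → Spec_genkeyshift keylist (genkeyshift keylist)

-- ===== LEMMAS AND PROOFS =====

def pvOrdSum (l : List Char) : Int := ((pvEveryOther l).map (fun c => (c.toNat : Int))).sum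

theorem pvOrdSum_nil : pvOrdSum [] = 0 := rfl

theorem pvOrdSum_cons (c : Char) (t : List Char) :
    pvOrdSum (c :: t) = (c.toNat : Int) + pvOrdSum t.tail := by
  cases t <;> simp [pvOrdSum, pvEveryOther]

theorem pv_foldl_range_cons (f : Int → Nat → Int) (n : Nat) (a : Int) :
    (List.range (n + 1)).foldl f a
      = (List.range n).foldl (fun kv i => f kv (i + 1)) (f a 0) := by
  rw [List.range_succ_eq_map]
  simp [List.foldl_map]

theorem pv_gen (l : List Char) : ∀ (k : Nat) (a : Int),
    (List.range l.length).foldl (fun kv i =>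
      let o : Int := ((l.getD i ' ').toNat : Int)
      match (i + k) % 2 with
      | 0 => kv + o
      | _ => kv - o) a
    = if k % 2 = 0 then a + pvOrdSum l - pvOrdSum l.tail
      else a - pvOrdSum l + pvOrdSum l.tail := by
  induction l with
  | nil =>
      intro k a
      simp only [List.length_nil, List.range_zero, List.foldl_nil, List.tail_nil,
        pvOrdSum_nil]
      split <;> ring
  | cons c t ih =>
      intro k a
      rw [List.length_cons, pv_foldl_range_cons]
      simp only [List.getD_cons_succ, List.getD_cons_zero, Nat.zero_add,
        Nat.add_right_comm]
      have h := ih (k + 1) (match k % 2 with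
        | 0 => a + ((c.toNat : Int))
        | _ => a - ((c.toNat : Int)))
      simp only [← Nat.add_assoc] at h
      rw [h]
      rcases Nat.mod_two_eq_zero_or_one k with hk | hk
      · have h1 : (k + 1) % 2 = 1 := by omega
        simp only [hk, h1, List.tail_cons, pvOrdSum_cons]
        norm_num
        ring
      · have h1 : (k + 1) % 2 = 0 := by omega
        simp only [hk, h1, List.tail_cons, pvOrdSum_cons]
        norm_num
        ring

-- ===== VERDICT (by name: the statement is the Claim_ definition above) =====
theorem genkeyshift_spec : Claim_equal_genkeyshift := by
  intro keylist _
  unfold Spec_genkeyshift genkeyshift genkeyshift_alt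
  have h := pv_gen keylist.toList 0 0
  simp only [Nat.add_zero] at h
  simp only [h]
  simp [pvOrdSum]
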